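-- pv_equiv track=rewrite | github.com/legend507/MyLeetCodeSolutions | LeetCodeNo.2955/main.py | sameEndSubstringCount_tooSlow
-- ===== SOURCE A (Python) =====
-- from typing import List
--
-- def sameEndSubstringCount_tooSlow(s: str, queries: List[List[int]]) -> List[int]:
--     # Check how many same-end substrings are in each query_answer.
--     # This is too slow.
--     def count_same_end_string(subs):
--         count = 0
--         for i in range(len(subs)):
--             for j in range(i+1, len(subs)):
--                 if subs[i] == subs[j]:
--                     count += 1
--         return count + len(subs)
--
--     # x * (x+1) / 2.
--     # E.g. a then 1, aa then 3, aaa then 6, aaaa then 10, ...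
--     # Still too slow...
--     def count_same_end_string_maths(subs):
--         freq = {}
--         for i in subs:
--             freq[i] = freq.get(i, 0) + 1
--
--         ret = 0
--         for key, value in freq.items():
--             ret += value * (value + 1) // 2
--         return ret
--
--     ret = []
--     for query in queries:
--         query_answer = (s[query[0]:query[1]+1])
--         ret.append(count_same_end_string_maths(query_answer))
--     return ret
-- ===== SOURCE B (Python) =====
-- from typing import List
--
-- def sameEndSubstringCount_tooSlow(s: str, queries: List[List[int]]) -> List[int]:
--     # Prefix frequency snapshots: prefs[i] holds the character counts of s[:i].
--     # Each query is answered from two snapshots, with no per-query scan of s.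
--     prefs = [{}]
--     cur = {}
--     for ch in s:
--         cur = dict(cur)
--         cur[ch] = cur.get(ch, 0) + 1
--         prefs.append(cur)
--
--     n = len(s)
--     out = []
--     for q in queries:
--         lo, hi, _ = slice(q[0], q[1] + 1).indices(n)
--         hi = max(lo, hi)
--         base, top = prefs[lo], prefs[hi]
--         total = 0
--         for c, v in top.items():
--             k = v - base.get(c, 0)
--             total += k * (k + 1) // 2
--         out.append(total)
--     return out
-- ===== Notes on version B (the rewrite author's own statement) =====
-- stated objective: alternative
-- what changed: Instead of slicing the string and building a fresh frequency dict per query, B precomputes prefix frequency snapshots of s once, normalizes each query's bounds with the stdlib slice.indices, and answers each query from two snapshots; it trades per-query scans of the slice for a one-time pass over s. Pre_ excludes only queries with fewer than two elements, on which A raises IndexError.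
import Mathlib
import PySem

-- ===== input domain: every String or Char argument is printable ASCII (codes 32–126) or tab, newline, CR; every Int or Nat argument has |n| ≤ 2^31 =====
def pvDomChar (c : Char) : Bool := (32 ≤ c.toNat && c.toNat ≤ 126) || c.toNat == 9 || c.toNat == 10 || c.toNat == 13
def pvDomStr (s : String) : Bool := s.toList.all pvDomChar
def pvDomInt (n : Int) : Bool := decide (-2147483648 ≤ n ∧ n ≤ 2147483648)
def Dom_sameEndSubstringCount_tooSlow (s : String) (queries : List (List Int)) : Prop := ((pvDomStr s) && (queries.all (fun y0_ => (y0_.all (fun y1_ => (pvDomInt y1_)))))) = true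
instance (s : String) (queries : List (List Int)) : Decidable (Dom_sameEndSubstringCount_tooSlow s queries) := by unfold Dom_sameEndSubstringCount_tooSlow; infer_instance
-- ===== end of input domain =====

-- B answers each query from prefix frequency snapshots of s built once, instead of
-- A's per-query slice-and-count; an alternative algorithm, proved to return A's value.

-- ===== PORT A =====
-- count_same_end_string_maths: frequency dict over the slice, then sum v*(v+1)//2
def pvCountMaths (subs : List Char) : Int :=
  let freq := subs.foldl (fun (d : PySem.Dict Char Int) i => d.insert i (d.getD i 0 + 1)) PySem.Dict.empty
  freq.items.foldl (fun ret kv => ret + PySem.Int.floordiv (kv.2 * (kv.2 + 1)) 2) 0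

def sameEndSubstringCount_tooSlow (s : String) (queries : List (List Int)) : List Int :=
  queries.foldl (fun ret query =>
    let query_answer := PySem.List.slice s.toList (some (PySem.List.pyGetD query 0 0)) (some (PySem.List.pyGetD query 1 0 + 1))
    ret ++ [pvCountMaths query_answer]) []

-- ===== PORT B =====
-- prefs[i] = character counts of s[:i], built incrementally (Source B's loop)
def pvPrefs (t : List Char) : List (PySem.Dict Char Int) :=
  (t.foldl (fun (p : List (PySem.Dict Char Int) × PySem.Dict Char Int) ch =>
      let cur := p.2.insert ch (p.2.getD ch 0 + 1)
      (p.1 ++ [cur], cur))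
    ([PySem.Dict.empty], PySem.Dict.empty)).1

-- Source B calls the stdlib slice(q[0], q[1]+1).indices(n) to normalize the bounds;
-- its exact Lean counterpart is PySem.List.clampIdx applied to each bound.
def sameEndSubstringCount_tooSlow_alt (s : String) (queries : List (List Int)) : List Int :=
  let t := s.toList
  let n := t.length
  let prefs := pvPrefs t
  queries.foldl (fun out q =>
    let lo := PySem.List.clampIdx n (PySem.List.pyGetD q 0 0)
    let hi0 := PySem.List.clampIdx n (PySem.List.pyGetD q 1 0 + 1)
    let hi := max lo hi0
    let base := prefs.getD lo PySem.Dict.empty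
    let total := (prefs.getD hi PySem.Dict.empty).items.foldl
      (fun tot kv =>
        let cnt := kv.2 - base.getD kv.1 0
        tot + PySem.Int.floordiv (cnt * (cnt + 1)) 2) 0
    out ++ [total]) []

-- ===== PRECONDITION & SPEC =====
-- Pre_ excludes exactly the inputs where Python A raises IndexError: a query with fewer than two elements.
def Pre_sameEndSubstringCount_tooSlow (s : String) (queries : List (List Int)) : Prop :=
  ∀ q ∈ queries, 2 ≤ q.length
instance (s : String) (queries : List (List Int)) : Decidable (Pre_sameEndSubstringCount_tooSlow s queries) := by unfold Pre_sameEndSubstringCount_tooSlow; infer_instance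
def pvWitness_sameEndSubstringCount_tooSlow : String × List (List Int) := ("abcaab", [[0, 3], [-2, 10]])

def Spec_sameEndSubstringCount_tooSlow (s : String) (queries : List (List Int)) (out : List Int) : Prop := out = sameEndSubstringCount_tooSlow_alt s queries
instance (s : String) (queries : List (List Int)) (out : List Int) : Decidable (Spec_sameEndSubstringCount_tooSlow s queries out) := by unfold Spec_sameEndSubstringCount_tooSlow; infer_instance

-- ===== CLAIM (what is proved, stated in full; the proofs are below) =====
def Claim_equal_sameEndSubstringCount_tooSlow : Prop := ∀ (s : String) (queries : List (List Int)), Dom_sameEndSubstringCount_tooSlow s queries → Pre_sameEndSubstringCount_tooSlow s queries → Spec_sameEndSubstringCount_tooSlow s queries (sameEndSubstringCount_tooSlow s queries)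

-- ===== LEMMAS AND PROOFS =====

-- the prefix-snapshot list is the counters of all prefixes
lemma pvPrefs_go (t : List Char) :
    ∀ (acc : List (PySem.Dict Char Int)) (cur : PySem.Dict Char Int),
    (t.foldl (fun (p : List (PySem.Dict Char Int) × PySem.Dict Char Int) ch =>
        let cur := p.2.insert ch (p.2.getD ch 0 + 1)
        (p.1 ++ [cur], cur)) (acc, cur)).1
    = acc ++ (List.range t.length).map
        (fun i => (t.take (i+1)).foldl (fun d x => d.insert x (d.getD x 0 + 1)) cur) := by
  induction t with
  | nil => simp
  | cons ch t' ih =>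
    intro acc cur
    simp only [List.foldl_cons, List.length_cons, List.range_succ_eq_map]
    rw [ih]
    simp [List.map_map, Function.comp, List.append_assoc]

lemma pvPrefs_eq (t : List Char) :
    pvPrefs t = (List.range (t.length + 1)).map (fun i => PySem.Dict.counter (t.take i)) := by
  unfold pvPrefs
  rw [pvPrefs_go]
  rw [List.range_succ_eq_map]
  simp only [List.map_cons, List.take_zero, List.map_map]
  simp [Function.comp, PySem.Dict.foldl_insert_getD_add_one_eq_counter]
  rfl

lemma pvPrefs_getD (t : List Char) (i : Nat) (h : i ≤ t.length) :
    (pvPrefs t).getD i PySem.Dict.empty = PySem.Dict.counter (t.take i) := by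
  rw [pvPrefs_eq, List.getD_eq_getElem?_getD]
  rw [List.getElem?_map, List.getElem?_range (by omega)]
  rfl

lemma toFinset_ofList {α : Type} [DecidableEq α] (l : List α) :
    (PySem.Set.ofList l).toFinset = l.toFinset := by
  ext x; simp [List.mem_toFinset, PySem.Set.mem_ofList]

-- sum of f(count in sub) over the distinct chars of a superset list = over sub's own chars
lemma sum_over_superset (big sub : List Char) (hsub : ∀ c, c ∈ sub → c ∈ big)
    (f : Int → Int) (hf : f 0 = 0) :
    ((PySem.Set.ofList big).map (fun c => f (sub.count c))).sum
    = ((PySem.Set.ofList sub).map (fun c => f (sub.count c))).sum := by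
  rw [← List.sum_toFinset _ (PySem.Set.nodup_ofList big),
      ← List.sum_toFinset _ (PySem.Set.nodup_ofList sub),
      toFinset_ofList, toFinset_ofList]
  refine (Finset.sum_subset ?_ ?_).symm
  · intro c hc; simp only [List.mem_toFinset] at *; exact hsub c hc
  · intro c _ hc
    simp only [List.mem_toFinset] at hc
    rw [List.count_eq_zero_of_not_mem hc]
    exact hf

-- per-query equality of the two ports
lemma query_eq (t : List Char) (a b : Int) :
    pvCountMaths (PySem.List.slice t (some a) (some (b+1)))
    = (let n := t.length
       let lo := PySem.List.clampIdx n a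
       let hi0 := PySem.List.clampIdx n (b + 1)
       let hi := max lo hi0
       let base := (pvPrefs t).getD lo PySem.Dict.empty
       ((pvPrefs t).getD hi PySem.Dict.empty).items.foldl
         (fun tot kv =>
           let cnt := kv.2 - base.getD kv.1 0
           tot + PySem.Int.floordiv (cnt * (cnt + 1)) 2) 0) := by
  simp only []
  set lo := PySem.List.clampIdx t.length a with hlo
  set hi0 := PySem.List.clampIdx t.length (b + 1) with hhi0
  set hi := max lo hi0 with hhi
  have hlon : lo ≤ t.length := PySem.List.clampIdx_le t.length a
  have hhi0n : hi0 ≤ t.length := PySem.List.clampIdx_le t.length (b + 1)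
  have hhin : hi ≤ t.length := by omega
  have hlohi : lo ≤ hi := by omega
  -- the slice is take (hi - lo) (drop lo t)
  have hslice : PySem.List.slice t (some a) (some (b+1)) = (t.drop lo).take (hi - lo) := by
    simp only [PySem.List.slice, ← hlo, ← hhi0]
    congr 1
    omega
  set sub := (t.drop lo).take (hi - lo) with hsubdef
  -- prefix decomposition: take hi t = take lo t ++ sub
  have hdecomp : t.take hi = t.take lo ++ sub := by
    have h2 : hi = lo + (hi - lo) := by omega
    rw [hsubdef, h2, List.take_add]
    simp
  have hcount : ∀ c : Char, (t.take hi).count c = (t.take lo).count c + sub.count c := by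
    intro c; rw [hdecomp, List.count_append]
  -- A side
  rw [hslice]
  unfold pvCountMaths
  simp only [PySem.Dict.foldl_insert_getD_add_one_eq_counter, PySem.Dict.items_counter]
  rw [PySem.List.foldl_add]
  -- B side
  rw [pvPrefs_getD t lo hlon, pvPrefs_getD t hi hhin, PySem.Dict.items_counter]
  rw [PySem.List.foldl_add]
  simp only [List.map_map, Function.comp_def, zero_add]
  have hmaps : ∀ c ∈ PySem.Set.ofList (t.take hi),
      (((t.take hi).count c : Int) - (PySem.Dict.counter (t.take lo)).getD c 0) = (sub.count c : Int) := by
    intro c _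
    rw [PySem.Dict.getD_counter, hcount c]
    push_cast; ring
  calc ((PySem.Set.ofList sub).map (fun k => PySem.Int.floordiv ((sub.count k : Int) * ((sub.count k : Int) + 1)) 2)).sum
      = ((PySem.Set.ofList (t.take hi)).map (fun k => PySem.Int.floordiv ((sub.count k : Int) * ((sub.count k : Int) + 1)) 2)).sum := by
        refine (sum_over_superset _ _ ?_ (fun v => PySem.Int.floordiv (v * (v + 1)) 2) (by decide)).symm
        intro c hc
        have : c ∈ t.take hi := by
          rw [hdecomp]; exact List.mem_append_right _ hc
        exact this
    _ = _ := by
        apply congrArg List.sum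
        apply List.map_congr_left
        intro c hc
        rw [hmaps c hc]

-- ===== VERDICT =====
theorem sameEndSubstringCount_tooSlow_spec : Claim_equal_sameEndSubstringCount_tooSlow := by
  intro s queries _ _
  unfold Spec_sameEndSubstringCount_tooSlow
  unfold sameEndSubstringCount_tooSlow sameEndSubstringCount_tooSlow_alt
  simp only [PySem.List.foldl_append_singleton_eq_map]
  apply List.map_congr_left
  intro q _
  exact query_eq s.toList (PySem.List.pyGetD q 0 0) (PySem.List.pyGetD q 1 0)
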